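-- pv_equiv track=rewrite | github.com/francois-meyer/pos-nguni | src/lstm_tagger.py | train2ids
-- ===== SOURCE A (Python) =====
-- def train2ids(train_words, train_tags):
--     word2index = {}
--     word2index["<unk>"] = 0
--     word2index["<pad>"] = 1
--     # word2index["<s>"] = 2
--
--     tag2index = {}
--     tag2index["<unk>"] = 0
--     tag2index["<pad>"] = 1
--     # tag2index["<s>"] = 2
--     index2tag = ["<unk", "<pad>"]  # "<s>"
--
--     # Create lists of lists to read corpus into
--     # [[word11, word12, ...], [word21, word22, ...]]
--     # [[tag11, tag12, ...], [tag21, tag22, ...]]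
--     words = []
--     tags = []
--
--     # Go throught training corpus line by line, reading words and tags into lists and creating vocabs
--     for i, sentence in enumerate(train_words):  # discard first line, which is just column headings
--
--         words.append([])
--         tags.append([])
--
--         for j, word in enumerate(sentence):
--             if not word in word2index:
--                 word2index[word] = len(word2index)
--             words[-1].append(word2index[word])
--
--             tag = train_tags[i][j]
--             if not tag in tag2index:
--                 tag2index[tag] = len(tag2index)
--                 index2tag.append(tag)
--             tags[-1].append(tag2index[tag])
--
--     return words, tags, word2index, tag2index, index2tag
-- ===== SOURCE B (Python) =====
-- def train2ids(train_words, train_tags):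
--     # Phase 1: build the vocabularies only, in the same first-occurrence order.
--     word2index = {"<unk>": 0, "<pad>": 1}
--     tag2index = {"<unk>": 0, "<pad>": 1}
--     index2tag = ["<unk", "<pad>"]
--     for i, sentence in enumerate(train_words):
--         for j, word in enumerate(sentence):
--             if word not in word2index:
--                 word2index[word] = len(word2index)
--             tag = train_tags[i][j]
--             if tag not in tag2index:
--                 tag2index[tag] = len(tag2index)
--                 index2tag.append(tag)
--     # Phase 2: encode the corpus against the now-complete vocabularies.
--     words = [[word2index[word] for word in sentence] for sentence in train_words]
--     tags = [[tag2index[train_tags[i][j]] for j in range(len(sentence))]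
--             for i, sentence in enumerate(train_words)]
--     return words, tags, word2index, tag2index, index2tag
-- ===== Notes on version B (the rewrite author's own statement) =====
-- stated objective: alternative
-- what changed: A interleaves vocabulary building with encoding in one nested pass that grows words/tags as it assigns indices; B first builds the complete word/tag vocabularies in one pass and then encodes the whole corpus by pure lookups in a second pass (comprehensions).
import Mathlib
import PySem

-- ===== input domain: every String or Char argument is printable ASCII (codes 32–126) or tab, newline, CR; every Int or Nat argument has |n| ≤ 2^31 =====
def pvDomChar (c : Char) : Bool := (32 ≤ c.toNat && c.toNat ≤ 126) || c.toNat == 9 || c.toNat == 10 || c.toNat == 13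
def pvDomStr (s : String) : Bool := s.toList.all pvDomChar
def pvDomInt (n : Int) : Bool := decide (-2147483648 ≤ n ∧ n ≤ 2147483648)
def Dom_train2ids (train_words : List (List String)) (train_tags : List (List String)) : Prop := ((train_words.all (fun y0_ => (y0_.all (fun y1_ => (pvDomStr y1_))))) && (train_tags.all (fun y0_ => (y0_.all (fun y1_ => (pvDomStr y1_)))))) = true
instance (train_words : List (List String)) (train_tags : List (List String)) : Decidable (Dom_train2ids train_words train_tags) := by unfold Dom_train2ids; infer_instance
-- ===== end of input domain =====

-- B differs from A only in decomposition (vocab pass + encode pass vs one interleaved pass);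
-- equivalence of the two ports is about return values (neither Python mutates its arguments).

-- ===== PORT A =====
-- state: (words, tags, word2index, tag2index, index2tag); inner loop body of A, one token
def pvAInner (tagSent : List String)
    (st : List Int × List Int × PySem.Dict String Int × PySem.Dict String Int × List String)
    (jw : Int × String) :
    List Int × List Int × PySem.Dict String Int × PySem.Dict String Int × List String :=
  let (ws, ts, w2i, t2i, i2t) := st
  let (_j, word) := jw
  let w2i := if w2i.contains word then w2i else w2i.insert word (w2i.size : Int)
  let ws := ws ++ [w2i.getD word 0]
  let tag := PySem.List.pyGetD tagSent jw.1 ""   -- train_tags[i][j]; Pre_ keeps it in range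
  let p := if t2i.contains tag then (t2i, i2t) else (t2i.insert tag (t2i.size : Int), i2t ++ [tag])
  (ws, ts ++ [p.1.getD tag 0], w2i, p.1, p.2)

-- outer loop body of A, one sentence (words[-1]/tags[-1] built as the inner accumulators)
def pvAOuter (train_tags : List (List String))
    (st : List (List Int) × List (List Int) × PySem.Dict String Int × PySem.Dict String Int × List String)
    (isent : Int × List String) :
    List (List Int) × List (List Int) × PySem.Dict String Int × PySem.Dict String Int × List String :=
  let (words, tags, w2i, t2i, i2t) := st
  let r := (PySem.List.enumerate isent.2).foldl
      (pvAInner (PySem.List.pyGetD train_tags isent.1 [])) ([], [], w2i, t2i, i2t)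
  (words ++ [r.1], tags ++ [r.2.1], r.2.2)

def train2ids (train_words : List (List String)) (train_tags : List (List String)) : List (List Int) × List (List Int) × (List (String × Int)) × (List (String × Int)) × List String :=
  let w2i0 : PySem.Dict String Int := (PySem.Dict.empty.insert "<unk>" 0).insert "<pad>" 1
  let t2i0 : PySem.Dict String Int := (PySem.Dict.empty.insert "<unk>" 0).insert "<pad>" 1
  let r := (PySem.List.enumerate train_words).foldl (pvAOuter train_tags)
      ([], [], w2i0, t2i0, ["<unk", "<pad>"])
  (r.1, r.2.1, r.2.2.1.items, r.2.2.2.1.items, r.2.2.2.2)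

-- ===== PORT B =====
-- phase-1 state: (word2index, tag2index, index2tag); one token
def pvBInner (tagSent : List String)
    (v : PySem.Dict String Int × PySem.Dict String Int × List String)
    (jw : Int × String) :
    PySem.Dict String Int × PySem.Dict String Int × List String :=
  let (w2i, t2i, i2t) := v
  let w2i := if w2i.contains jw.2 then w2i else w2i.insert jw.2 (w2i.size : Int)
  let tag := PySem.List.pyGetD tagSent jw.1 ""
  if t2i.contains tag then (w2i, t2i, i2t)
  else (w2i, t2i.insert tag (t2i.size : Int), i2t ++ [tag])

def pvBOuter (train_tags : List (List String))
    (v : PySem.Dict String Int × PySem.Dict String Int × List String)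
    (isent : Int × List String) :
    PySem.Dict String Int × PySem.Dict String Int × List String :=
  (PySem.List.enumerate isent.2).foldl (pvBInner (PySem.List.pyGetD train_tags isent.1 [])) v

def train2ids_alt (train_words : List (List String)) (train_tags : List (List String)) : List (List Int) × List (List Int) × (List (String × Int)) × (List (String × Int)) × List String :=
  let v0 : PySem.Dict String Int × PySem.Dict String Int × List String :=
    ((PySem.Dict.empty.insert "<unk>" 0).insert "<pad>" 1,
     (PySem.Dict.empty.insert "<unk>" 0).insert "<pad>" 1, ["<unk", "<pad>"])
  let v := (PySem.List.enumerate train_words).foldl (pvBOuter train_tags) v0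
  let words := train_words.map (fun s => s.map (fun w => v.1.getD w 0))
  let tags := (PySem.List.enumerate train_words).map (fun isent =>
      (PySem.List.pyRange 0 (isent.2.length : Int) 1).map (fun j =>
        v.2.1.getD (PySem.List.pyGetD (PySem.List.pyGetD train_tags isent.1 []) j "") 0))
  (words, tags, v.1.items, v.2.1.items, v.2.2)

-- ===== PRECONDITION & SPEC =====
-- Pre_ excludes exactly the ragged corpora on which the Python A raises IndexError at
-- train_tags[i][j] (a tag sentence missing or shorter than its word sentence).
def Pre_train2ids (train_words : List (List String)) (train_tags : List (List String)) : Prop :=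
  ∀ i (_ : i < train_words.length), train_words[i].length ≤ (train_tags.getD i []).length
instance (train_words : List (List String)) (train_tags : List (List String)) : Decidable (Pre_train2ids train_words train_tags) := by unfold Pre_train2ids; infer_instance
def pvWitness_train2ids : List (List String) × List (List String) :=
  ([["a", "b"], ["a", "c"]], [["N", "V"], ["N", "N"]])
def Spec_train2ids (train_words : List (List String)) (train_tags : List (List String)) (out : List (List Int) × List (List Int) × (List (String × Int)) × (List (String × Int)) × List String) : Prop := out = train2ids_alt train_words train_tags
instance (train_words : List (List String)) (train_tags : List (List String)) (out : List (List Int) × List (List Int) × (List (String × Int)) × (List (String × Int)) × List String) : Decidable (Spec_train2ids train_words train_tags out) := by unfold Spec_train2ids; infer_instance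

-- ===== CLAIM (what is proved, stated in full; the proofs are below) =====
def Claim_equal_train2ids : Prop := ∀ (train_words : List (List String)) (train_tags : List (List String)), Dom_train2ids train_words train_tags → Pre_train2ids train_words train_tags → Spec_train2ids train_words train_tags (train2ids train_words train_tags)

-- ===== LEMMAS AND PROOFS =====\n
-- vocab extension: every key-value binding of v survives into v' (for both dicts)
def pvExt (v v' : PySem.Dict String Int × PySem.Dict String Int × List String) : Prop :=
  (∀ k val, v.1.get? k = some val → v'.1.get? k = some val) ∧
  (∀ k val, v.2.1.get? k = some val → v'.2.1.get? k = some val)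

theorem pvExt_refl (v : PySem.Dict String Int × PySem.Dict String Int × List String) : pvExt v v :=
  ⟨fun _ _ h => h, fun _ _ h => h⟩

theorem pvExt_trans {u v w : PySem.Dict String Int × PySem.Dict String Int × List String}
    (h1 : pvExt u v) (h2 : pvExt v w) : pvExt u w :=
  ⟨fun k val h => h2.1 k val (h1.1 k val h), fun k val h => h2.2 k val (h1.2 k val h)⟩

-- the conditional "add if absent" step keeps every existing binding
theorem pvCondInsert_keeps {d : PySem.Dict String Int} (k' : String) (x : Int) {k : String}
    {val : Int} (h : d.get? k = some val) :
    (if d.contains k' then d else d.insert k' x).get? k = some val := by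
  split_ifs with hc
  · exact h
  · rw [PySem.Dict.get?_insert]
    split_ifs with he
    · subst he
      rw [(PySem.Dict.get?_eq_none_iff_contains d k).2 (by simpa using hc)] at h
      exact absurd h (by simp)
    · exact h

-- after the step, the stepped key is bound
theorem pvCondInsert_bound (d : PySem.Dict String Int) (k : String) (x : Int) :
    ∃ val, (if d.contains k then d else d.insert k x).get? k = some val := by
  split_ifs with hc
  · rw [PySem.Dict.contains_eq_isSome_get? d k] at hc
    exact Option.isSome_iff_exists.1 hc
  · exact ⟨x, PySem.Dict.get?_insert_self d k x⟩

theorem pvGetD_eq_of_ext {d dfin : PySem.Dict String Int} {k : String} {val : Int}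
    (h : d.get? k = some val) (hext : ∀ k' v', d.get? k' = some v' → dfin.get? k' = some v') :
    d.getD k 0 = dfin.getD k 0 := by
  rw [PySem.Dict.getD_of_get?_eq_some d 0 h, PySem.Dict.getD_of_get?_eq_some dfin 0 (hext k val h)]

-- shape of one B phase-1 token step, written componentwise
theorem pvBInner_eq (ts0 : List String) (w2i t2i : PySem.Dict String Int) (i2t : List String)
    (jw : Int × String) :
    pvBInner ts0 (w2i, t2i, i2t) jw =
      (if w2i.contains jw.2 then w2i else w2i.insert jw.2 (w2i.size : Int),
       if t2i.contains (PySem.List.pyGetD ts0 jw.1 "") then t2i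
         else t2i.insert (PySem.List.pyGetD ts0 jw.1 "") (t2i.size : Int),
       if t2i.contains (PySem.List.pyGetD ts0 jw.1 "") then i2t
         else i2t ++ [PySem.List.pyGetD ts0 jw.1 ""]) := by
  simp only [pvBInner]
  split_ifs <;> rfl

-- shape of one A token step: same vocab update, plus the two appended ids
theorem pvAInner_eq (ts0 : List String) (ws tsacc : List Int)
    (w2i t2i : PySem.Dict String Int) (i2t : List String) (jw : Int × String) :
    pvAInner ts0 (ws, tsacc, w2i, t2i, i2t) jw =
      (ws ++ [(if w2i.contains jw.2 then w2i else w2i.insert jw.2 (w2i.size : Int)).getD jw.2 0],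
       tsacc ++ [(if t2i.contains (PySem.List.pyGetD ts0 jw.1 "") then t2i
           else t2i.insert (PySem.List.pyGetD ts0 jw.1 "") (t2i.size : Int)).getD
           (PySem.List.pyGetD ts0 jw.1 "") 0],
       if w2i.contains jw.2 then w2i else w2i.insert jw.2 (w2i.size : Int),
       if t2i.contains (PySem.List.pyGetD ts0 jw.1 "") then t2i
         else t2i.insert (PySem.List.pyGetD ts0 jw.1 "") (t2i.size : Int),
       if t2i.contains (PySem.List.pyGetD ts0 jw.1 "") then i2t
         else i2t ++ [PySem.List.pyGetD ts0 jw.1 ""]) := by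
  simp only [pvAInner]
  split_ifs <;> rfl

theorem pvExt_pvBInner (ts0 : List String)
    (v : PySem.Dict String Int × PySem.Dict String Int × List String) (jw : Int × String) :
    pvExt v (pvBInner ts0 v jw) := by
  obtain ⟨w2i, t2i, i2t⟩ := v
  rw [pvBInner_eq]
  exact ⟨fun k val h => pvCondInsert_keeps _ _ h, fun k val h => pvCondInsert_keeps _ _ h⟩

theorem pvExt_foldl {α : Type}
    (f : (PySem.Dict String Int × PySem.Dict String Int × List String) → α →
         (PySem.Dict String Int × PySem.Dict String Int × List String))
    (hstep : ∀ v a, pvExt v (f v a)) :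
    ∀ (l : List α) (v), pvExt v (l.foldl f v) := by
  intro l
  induction l with
  | nil => intro v; exact pvExt_refl v
  | cons a l ih => intro v; exact pvExt_trans (hstep v a) (ih (f v a))

theorem pvExt_pvBOuter (tt : List (List String))
    (v : PySem.Dict String Int × PySem.Dict String Int × List String) (isent : Int × List String) :
    pvExt v (pvBOuter tt v isent) :=
  pvExt_foldl _ (pvExt_pvBInner _) _ v

-- one A token step, with both appended ids rewritten as lookups in any extension vfin
theorem pvAInner_step (ts0 : List String)
    (vfin : PySem.Dict String Int × PySem.Dict String Int × List String)
    (ws tsacc : List Int) (v : PySem.Dict String Int × PySem.Dict String Int × List String)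
    (jw : Int × String) (hext : pvExt (pvBInner ts0 v jw) vfin) :
    pvAInner ts0 (ws, tsacc, v) jw =
      (ws ++ [vfin.1.getD jw.2 0],
       tsacc ++ [vfin.2.1.getD (PySem.List.pyGetD ts0 jw.1 "") 0],
       pvBInner ts0 v jw) := by
  obtain ⟨w2i, t2i, i2t⟩ := v
  rw [pvBInner_eq] at hext ⊢
  rw [pvAInner_eq]
  obtain ⟨valw, hw⟩ := pvCondInsert_bound w2i jw.2 (w2i.size : Int)
  obtain ⟨valt, ht⟩ := pvCondInsert_bound t2i (PySem.List.pyGetD ts0 jw.1 "") (t2i.size : Int)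
  rw [pvGetD_eq_of_ext hw hext.1, pvGetD_eq_of_ext ht hext.2]

theorem pvInner_eq (ts0 : List String)
    (vfin : PySem.Dict String Int × PySem.Dict String Int × List String) :
    ∀ (l : List (Int × String)) (ws tsacc : List Int)
      (v : PySem.Dict String Int × PySem.Dict String Int × List String),
    pvExt (l.foldl (pvBInner ts0) v) vfin →
    l.foldl (pvAInner ts0) (ws, tsacc, v) =
      (ws ++ l.map (fun jw => vfin.1.getD jw.2 0),
       tsacc ++ l.map (fun jw => vfin.2.1.getD (PySem.List.pyGetD ts0 jw.1 "") 0),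
       l.foldl (pvBInner ts0) v) := by
  intro l
  induction l with
  | nil => intro ws tsacc v _; simp
  | cons jw l ih =>
    intro ws tsacc v h
    rw [List.foldl_cons] at h
    have hstepext : pvExt (pvBInner ts0 v jw) vfin :=
      pvExt_trans (pvExt_foldl _ (pvExt_pvBInner ts0) l (pvBInner ts0 v jw)) h
    rw [List.foldl_cons, List.foldl_cons, pvAInner_step ts0 vfin ws tsacc v jw hstepext,
      ih _ _ _ h]
    simp

-- maps over enumerate collapse to maps over the list / over the index range
theorem pvMap_enumerate_snd {α β : Type} (xs : List α) (f : α → β) :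
    (PySem.List.enumerate xs).map (fun p => f p.2) = xs.map f := by
  conv_rhs => rw [← PySem.List.map_snd_enumerate xs 0, List.map_map]
  rfl

theorem pvMap_enumerate_fst {α β : Type} (xs : List α) (g : Int → β) :
    (PySem.List.enumerate xs).map (fun p => g p.1) =
      (PySem.List.pyRange 0 (xs.length : Int)).map g := by
  have h := congrArg (List.map g) (PySem.List.map_fst_enumerate xs 0)
  rw [List.map_map] at h
  simpa using h

theorem pvOuter_eq (tt : List (List String))
    (vfin : PySem.Dict String Int × PySem.Dict String Int × List String) :
    ∀ (l : List (Int × List String)) (words tags : List (List Int))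
      (v : PySem.Dict String Int × PySem.Dict String Int × List String),
    pvExt (l.foldl (pvBOuter tt) v) vfin →
    l.foldl (pvAOuter tt) (words, tags, v) =
      (words ++ l.map (fun isent => isent.2.map (fun w => vfin.1.getD w 0)),
       tags ++ l.map (fun isent =>
         (PySem.List.pyRange 0 (isent.2.length : Int)).map (fun j =>
           vfin.2.1.getD (PySem.List.pyGetD (PySem.List.pyGetD tt isent.1 []) j "") 0)),
       l.foldl (pvBOuter tt) v) := by
  intro l
  induction l with
  | nil => intro words tags v _; simp
  | cons isent l ih =>
    intro words tags v h
    rw [List.foldl_cons] at h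
    have hstepext : pvExt (pvBOuter tt v isent) vfin :=
      pvExt_trans (pvExt_foldl _ (pvExt_pvBOuter tt) l (pvBOuter tt v isent)) h
    have hin := pvInner_eq (PySem.List.pyGetD tt isent.1 []) vfin
      (PySem.List.enumerate isent.2) [] [] v (by simpa [pvBOuter] using hstepext)
    have hstep : pvAOuter tt (words, tags, v) isent =
        (words ++ [isent.2.map (fun w => vfin.1.getD w 0)],
         tags ++ [(PySem.List.pyRange 0 (isent.2.length : Int)).map (fun j =>
           vfin.2.1.getD (PySem.List.pyGetD (PySem.List.pyGetD tt isent.1 []) j "") 0)],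
         pvBOuter tt v isent) := by
      simp only [pvAOuter, hin, List.nil_append, pvBOuter]
      rw [pvMap_enumerate_snd isent.2 (fun w => vfin.1.getD w 0),
        pvMap_enumerate_fst isent.2 (fun j =>
          vfin.2.1.getD (PySem.List.pyGetD (PySem.List.pyGetD tt isent.1 []) j "") 0)]
    rw [List.foldl_cons, List.foldl_cons, hstep, ih _ _ _ h]
    simp

-- ===== VERDICT (by name: the statement is the Claim_ definition above) =====
theorem train2ids_spec : Claim_equal_train2ids := by
  intro tw tt _ _
  show train2ids tw tt = train2ids_alt tw tt
  simp only [train2ids, train2ids_alt]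
  rw [pvOuter_eq tt _ (PySem.List.enumerate tw) [] [] _ (pvExt_refl _)]
  rw [pvMap_enumerate_snd tw (fun s => s.map (fun w =>
    ((PySem.List.enumerate tw).foldl (pvBOuter tt)
        ((PySem.Dict.empty.insert "<unk>" 0).insert "<pad>" 1,
         (PySem.Dict.empty.insert "<unk>" 0).insert "<pad>" 1, ["<unk", "<pad>"])).1.getD w 0))]
  simp
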